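-- pv_equiv track=rewrite | github.com/seemamp002/mlperf_inference_submissions_v5.0 | add_results_summary.py | get_table_header
-- ===== SOURCE A (Python) =====
-- def get_stripe_image():
--     html_stripe_svg = f"""<div class="yellow-strip floater" data-speed="0.1" style="transform: translate3d(0px, 19px, 0px);">
-- <svg role="presentation" aria-hidden="true" width="83" height="21" viewBox="0 0 83 21" fill="none" xmlns="http://www.w3.org/2000/svg">
-- <path d="M0 0L0 3.42863L3.24487 0L0 0Z" fill="#FBBC04"></path>
-- <path d="M8.29399 0L0 8.76368L0 12.202L11.5481 0L8.29399 0Z" fill="#FBBC04"></path>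
-- <path d="M16.5972 0L0 17.5371L0 20.9754L19.8513 0L16.5972 0Z" fill="#FBBC04"></path>
-- <path d="M24.9016 0L5.02734 20.9998H8.28142L28.1557 0L24.9016 0Z" fill="#FBBC04"></path>
-- <path d="M33.2024 0L13.3281 20.9998H16.5822L36.4565 0L33.2024 0Z" fill="#FBBC04"></path>
-- <path d="M41.5071 0L21.6328 20.9998H24.8869L44.7611 0L41.5071 0Z" fill="#FBBC04"></path>
-- <path d="M49.8079 0L29.9336 20.9998H33.1923L53.0619 0L49.8079 0Z" fill="#FBBC04"></path>
-- <path d="M58.1119 0L38.2422 20.9998H41.4963L61.3659 0L58.1119 0Z" fill="#FBBC04"></path>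
-- <path d="M66.4165 0L46.5469 20.9998H49.801L69.6706 0L66.4165 0Z" fill="#FBBC04"></path>
-- <path d="M74.7212 0L54.8516 20.9998H58.1056L77.9753 0L74.7212 0Z" fill="#FBBC04"></path>
-- <path d="M66.4064 20.9989L82.999 3.4618V0.0234375L63.1523 20.9989H66.4064Z" fill="#FBBC04"></path>
-- <path d="M74.7111 20.9989L83.0005 12.2352V8.79688L71.457 20.9989H74.7111Z" fill="#FBBC04"></path>
-- <path d="M82.9981 20.9989V17.5703L79.7578 20.9989H82.9981Z" fill="#FBBC04"></path>
-- </svg>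
-- </div>
-- """
--     return html_stripe_svg
--
-- def get_table_header(division, category):
--     if division == "open":
--         accuracy_achieved_header = '<th>Accuracy</th>'
--         colspan = "3"
--     else:
--         accuracy_achieved_header = "" #dont show accuracy as submitters are only expected to achieve the target
--         colspan = "2"
--
--     num_scenarios = 1
--     html_stripe_svg = get_stripe_image()
--     html_table_head = f"""{html_stripe_svg}
-- <h3>Results Table</h3>
-- <div class="table-container">
-- <table class="table results-table">
-- <tr>
-- <th rowspan="2" class="th-parent">Model</th>
-- <th rowspan="2" class="th-parent">Accuracy Target</th>
-- """
--     if "datacenter" in category: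
--         num_scenarios += 1
--         html_table_head += f"""<th colspan="{colspan}">Server</th>
-- """
--
--     html_table_head += f"""<th colspan="{colspan}">Offline</th>
-- """
--
--     if "edge" in category:
--         num_scenarios += 2
--         html_table_head += f"""<th colspan="{colspan}">SingleStream</th>
-- <th colspan="{colspan}">MultiStream</th>
-- """
--     html_table_head += f"""</tr>
-- <tr>
-- """
--
--     for i in range(num_scenarios):
--         html_table_head += f"""{accuracy_achieved_header}
-- <th>Metric</th>
-- <th>Performance</th>
-- """
--
--     html_table_head += f"""</tr>"""
--     return html_table_head
-- ===== SOURCE B (Python) =====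
-- def get_table_header(division, category):
--     if division == "open":
--         accuracy_achieved_header = '<th>Accuracy</th>'
--         colspan = "3"
--     else:
--         accuracy_achieved_header = ""
--         colspan = "2"
--     scenarios = []
--     if "datacenter" in category:
--         scenarios.append("Server")
--     scenarios.append("Offline")
--     if "edge" in category:
--         scenarios.extend(["SingleStream", "MultiStream"])
--     prefix = (get_stripe_image() + "\n"
--               "<h3>Results Table</h3>\n"
--               '<div class="table-container">\n'
--               '<table class="table results-table">\n'
--               "<tr>\n"
--               '<th rowspan="2" class="th-parent">Model</th>\n'
--               '<th rowspan="2" class="th-parent">Accuracy Target</th>\n')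
--     scenario_row = "".join(f'<th colspan="{colspan}">{name}</th>\n' for name in scenarios)
--     sub_row = "".join(f"{accuracy_achieved_header}\n<th>Metric</th>\n<th>Performance</th>\n"
--                       for _ in scenarios)
--     return prefix + scenario_row + "</tr>\n<tr>\n" + sub_row + "</tr>"
--
-- def get_stripe_image():
--     html_stripe_svg = """<div class="yellow-strip floater" data-speed="0.1" style="transform: translate3d(0px, 19px, 0px);">
-- <svg role="presentation" aria-hidden="true" width="83" height="21" viewBox="0 0 83 21" fill="none" xmlns="http://www.w3.org/2000/svg">
-- <path d="M0 0L0 3.42863L3.24487 0L0 0Z" fill="#FBBC04"></path>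
-- <path d="M8.29399 0L0 8.76368L0 12.202L11.5481 0L8.29399 0Z" fill="#FBBC04"></path>
-- <path d="M16.5972 0L0 17.5371L0 20.9754L19.8513 0L16.5972 0Z" fill="#FBBC04"></path>
-- <path d="M24.9016 0L5.02734 20.9998H8.28142L28.1557 0L24.9016 0Z" fill="#FBBC04"></path>
-- <path d="M33.2024 0L13.3281 20.9998H16.5822L36.4565 0L33.2024 0Z" fill="#FBBC04"></path>
-- <path d="M41.5071 0L21.6328 20.9998H24.8869L44.7611 0L41.5071 0Z" fill="#FBBC04"></path>
-- <path d="M49.8079 0L29.9336 20.9998H33.1923L53.0619 0L49.8079 0Z" fill="#FBBC04"></path>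
-- <path d="M58.1119 0L38.2422 20.9998H41.4963L61.3659 0L58.1119 0Z" fill="#FBBC04"></path>
-- <path d="M66.4165 0L46.5469 20.9998H49.801L69.6706 0L66.4165 0Z" fill="#FBBC04"></path>
-- <path d="M74.7212 0L54.8516 20.9998H58.1056L77.9753 0L74.7212 0Z" fill="#FBBC04"></path>
-- <path d="M66.4064 20.9989L82.999 3.4618V0.0234375L63.1523 20.9989H66.4064Z" fill="#FBBC04"></path>
-- <path d="M74.7111 20.9989L83.0005 12.2352V8.79688L71.457 20.9989H74.7111Z" fill="#FBBC04"></path>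
-- <path d="M82.9981 20.9989V17.5703L79.7578 20.9989H82.9981Z" fill="#FBBC04"></path>
-- </svg>
-- </div>
-- """
--     return html_stripe_svg
-- ===== Notes on version B (the rewrite author's own statement) =====
-- stated objective: simpler
-- what changed: B first builds the list of scenario column labels, then renders the scenario row and the per-scenario sub-row by mapping/joining over that list, instead of A's interleaved counter increments and in-place string appends followed by a range loop.
import Mathlib
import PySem

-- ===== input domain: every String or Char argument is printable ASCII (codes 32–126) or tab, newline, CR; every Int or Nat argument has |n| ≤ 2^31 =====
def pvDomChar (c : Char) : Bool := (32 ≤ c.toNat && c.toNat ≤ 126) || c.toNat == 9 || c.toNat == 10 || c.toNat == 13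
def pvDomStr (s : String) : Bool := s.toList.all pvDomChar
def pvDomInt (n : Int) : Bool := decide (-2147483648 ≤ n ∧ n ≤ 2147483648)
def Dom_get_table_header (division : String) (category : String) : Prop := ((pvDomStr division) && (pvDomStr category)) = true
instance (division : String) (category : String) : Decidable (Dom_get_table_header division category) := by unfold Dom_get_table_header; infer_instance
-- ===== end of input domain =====

-- B re-decomposes A: it first collects the scenario names in a list, then renders the two
-- header rows by mapping/joining over that list instead of A's interleaved counter-and-append
-- string building (objective: simpler decomposition; same cost).

-- the constant SVG block returned by get_stripe_image (shared verbatim by both Pythons)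
def get_stripe_image : String := "<div class=\"yellow-strip floater\" data-speed=\"0.1\" style=\"transform: translate3d(0px, 19px, 0px);\">\n<svg role=\"presentation\" aria-hidden=\"true\" width=\"83\" height=\"21\" viewBox=\"0 0 83 21\" fill=\"none\" xmlns=\"http://www.w3.org/2000/svg\">\n<path d=\"M0 0L0 3.42863L3.24487 0L0 0Z\" fill=\"#FBBC04\"></path>\n<path d=\"M8.29399 0L0 8.76368L0 12.202L11.5481 0L8.29399 0Z\" fill=\"#FBBC04\"></path>\n<path d=\"M16.5972 0L0 17.5371L0 20.9754L19.8513 0L16.5972 0Z\" fill=\"#FBBC04\"></path>\n<path d=\"M24.9016 0L5.02734 20.9998H8.28142L28.1557 0L24.9016 0Z\" fill=\"#FBBC04\"></path>\n<path d=\"M33.2024 0L13.3281 20.9998H16.5822L36.4565 0L33.2024 0Z\" fill=\"#FBBC04\"></path>\n<path d=\"M41.5071 0L21.6328 20.9998H24.8869L44.7611 0L41.5071 0Z\" fill=\"#FBBC04\"></path>\n<path d=\"M49.8079 0L29.9336 20.9998H33.1923L53.0619 0L49.8079 0Z\" fill=\"#FBBC04\"></path>\n<path d=\"M58.1119 0L38.2422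 20.9998H41.4963L61.3659 0L58.1119 0Z\" fill=\"#FBBC04\"></path>\n<path d=\"M66.4165 0L46.5469 20.9998H49.801L69.6706 0L66.4165 0Z\" fill=\"#FBBC04\"></path>\n<path d=\"M74.7212 0L54.8516 20.9998H58.1056L77.9753 0L74.7212 0Z\" fill=\"#FBBC04\"></path>\n<path d=\"M66.4064 20.9989L82.999 3.4618V0.0234375L63.1523 20.9989H66.4064Z\" fill=\"#FBBC04\"></path>\n<path d=\"M74.7111 20.9989L83.0005 12.2352V8.79688L71.457 20.9989H74.7111Z\" fill=\"#FBBC04\"></path>\n<path d=\"M82.9981 20.9989V17.5703L79.7578 20.9989H82.9981Z\" fill=\"#FBBC04\"></path>\n</svg>\n</div>\n"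

-- ===== PORT A =====
def get_table_header (division : String) (category : String) : String :=
  let accuracy_achieved_header : String := if division == "open" then "<th>Accuracy</th>" else ""
  let colspan : String := if division == "open" then "3" else "2"
  let num_scenarios : Int := 1
  let html_stripe_svg := get_stripe_image
  let html_table_head := html_stripe_svg ++ "\n<h3>Results Table</h3>\n<div class=\"table-container\">\n<table class=\"table results-table\">\n<tr>\n<th rowspan=\"2\" class=\"th-parent\">Model</th>\n<th rowspan=\"2\" class=\"th-parent\">Accuracy Target</th>\n"
  let num_scenarios := if PySem.Str.isIn "datacenter" category then num_scenarios + 1 else num_scenarios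
  let html_table_head := if PySem.Str.isIn "datacenter" category then
      html_table_head ++ "<th colspan=\"" ++ colspan ++ "\">Server</th>\n" else html_table_head
  let html_table_head := html_table_head ++ "<th colspan=\"" ++ colspan ++ "\">Offline</th>\n"
  let num_scenarios := if PySem.Str.isIn "edge" category then num_scenarios + 2 else num_scenarios
  let html_table_head := if PySem.Str.isIn "edge" category then
      html_table_head ++ "<th colspan=\"" ++ colspan ++ "\">SingleStream</th>\n<th colspan=\"" ++ colspan ++ "\">MultiStream</th>\n" else html_table_head
  let html_table_head := html_table_head ++ "</tr>\n<tr>\n"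
  let html_table_head := (PySem.List.pyRange 0 num_scenarios 1).foldl
      (fun acc _ => acc ++ accuracy_achieved_header ++ "\n<th>Metric</th>\n<th>Performance</th>\n") html_table_head
  html_table_head ++ "</tr>"

-- ===== PORT B =====
def get_table_header_alt (division : String) (category : String) : String :=
  let accuracy_achieved_header : String := if division == "open" then "<th>Accuracy</th>" else ""
  let colspan : String := if division == "open" then "3" else "2"
  let scenarios : List String :=
    (if PySem.Str.isIn "datacenter" category then ["Server"] else []) ++ ["Offline"] ++
    (if PySem.Str.isIn "edge" category then ["SingleStream", "MultiStream"] else [])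
  let prefix_ := get_stripe_image ++ "\n<h3>Results Table</h3>\n<div class=\"table-container\">\n<table class=\"table results-table\">\n<tr>\n<th rowspan=\"2\" class=\"th-parent\">Model</th>\n<th rowspan=\"2\" class=\"th-parent\">Accuracy Target</th>\n"
  let scenario_row := PySem.Str.join "" (scenarios.map
      (fun name => "<th colspan=\"" ++ colspan ++ "\">" ++ name ++ "</th>\n"))
  let sub_row := PySem.Str.join "" (scenarios.map
      (fun _ => accuracy_achieved_header ++ "\n<th>Metric</th>\n<th>Performance</th>\n"))
  prefix_ ++ scenario_row ++ "</tr>\n<tr>\n" ++ sub_row ++ "</tr>"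

-- ===== PRECONDITION & SPEC =====
def Spec_get_table_header (division : String) (category : String) (out : String) : Prop := out = get_table_header_alt division category
instance (division : String) (category : String) (out : String) : Decidable (Spec_get_table_header division category out) := by unfold Spec_get_table_header; infer_instance

-- ===== CLAIM (what is proved, stated in full; the proofs are below) =====
def Claim_equal_get_table_header : Prop := ∀ (division : String) (category : String), Dom_get_table_header division category → Spec_get_table_header division category (get_table_header division category)

-- ===== LEMMAS AND PROOFS =====

-- ===== VERDICT (by name: the statement is the Claim_ definition above) =====
set_option maxRecDepth 40000 in
set_option maxHeartbeats 1000000 in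
theorem get_table_header_spec : Claim_equal_get_table_header := by
  intro division category _
  unfold Spec_get_table_header get_table_header get_table_header_alt
  generalize (division == "open") = b1
  generalize PySem.Str.isIn "datacenter" category = b2
  generalize PySem.Str.isIn "edge" category = b3
  revert b1 b2 b3
  decide
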